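-- pv_equiv track=rewrite | github.com/Zuliy/A2SV_Solved_Questions | leetcode/1922-count-good-numbers/1922-count-good-numbers.py | countGoodNumbers
-- ===== SOURCE A (Python) =====
-- def countGoodNumbers(n: int) -> int:
--     MOD = 10**9 + 7
--
--     def power(base, exp):
--         result = 1
--         base %= MOD
--
--         while exp > 0:
--             if exp % 2 == 1:
--                 result = (result * base) % MOD
--             base = (base * base) % MOD
--             exp //= 2
--
--         return result
--
--     even_positions = (n + 1) // 2
--     odd_positions = n // 2
--
--     return (power(5, even_positions) * power(4, odd_positions)) % MOD
-- ===== SOURCE B (Python) =====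
-- def countGoodNumbers(n: int) -> int:
--     MOD = 10**9 + 7
--
--     def power(base, exp):
--         if exp <= 0:
--             return 1
--         base %= MOD
--         h = power(base, exp // 2)
--         r = (h * h) % MOD
--         if exp % 2 == 1:
--             r = (r * base) % MOD
--         return r
--
--     even_positions = (n + 1) // 2
--     odd_positions = n // 2
--
--     return (power(5, even_positions) * power(4, odd_positions)) % MOD
-- ===== Notes on version B (the rewrite author's own statement) =====
-- stated objective: alternative
-- what changed: The iterative while-loop binary exponentiation with a running result/base accumulator is replaced by a recursive divide-and-conquer power: recurse on the halved exponent, square the recursive result, and multiply by the base once when the exponent is odd.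
import Mathlib
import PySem

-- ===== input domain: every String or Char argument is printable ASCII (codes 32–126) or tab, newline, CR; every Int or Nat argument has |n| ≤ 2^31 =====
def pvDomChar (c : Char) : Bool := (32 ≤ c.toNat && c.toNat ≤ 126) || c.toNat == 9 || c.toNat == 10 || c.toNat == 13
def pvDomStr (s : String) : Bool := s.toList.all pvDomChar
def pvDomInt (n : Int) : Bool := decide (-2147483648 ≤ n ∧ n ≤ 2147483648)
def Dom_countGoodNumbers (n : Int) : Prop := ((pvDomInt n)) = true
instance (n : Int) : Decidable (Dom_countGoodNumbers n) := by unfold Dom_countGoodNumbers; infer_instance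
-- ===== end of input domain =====

-- B replaces A's iterative while-loop binary exponentiation by a recursive
-- divide-and-conquer power (square the recursive half, multiply by base if odd);
-- objective: alternative decomposition, same asymptotic cost.

-- ===== PORT A =====
-- the while-loop of A's `power`, state (result, base, exp)
def pvPowLoopA (result base exp : Int) : Int :=
  if h : exp > 0 then
    let result' := if PySem.Int.mod exp 2 = 1 then (result * base) % 1000000007 else result
    pvPowLoopA result' ((base * base) % 1000000007) (PySem.Int.floordiv exp 2)
  else result
termination_by exp.toNat
decreasing_by
  rw [PySem.Int.floordiv_eq_ediv_of_pos (by omega : (0:Int) < 2)]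
  omega

-- A's `power`: result = 1, base %= MOD, then the loop
def pvPowerA (base exp : Int) : Int :=
  pvPowLoopA 1 (PySem.Int.mod base 1000000007) exp

def countGoodNumbers (n : Int) : Int :=
  let even_positions := PySem.Int.floordiv (n + 1) 2
  let odd_positions := PySem.Int.floordiv n 2
  PySem.Int.mod (pvPowerA 5 even_positions * pvPowerA 4 odd_positions) 1000000007

-- ===== PORT B =====
-- B's recursive divide-and-conquer `power`
def pvPowerB (base exp : Int) : Int :=
  if h : exp ≤ 0 then 1
  else
    let b := PySem.Int.mod base 1000000007
    let hh := pvPowerB b (PySem.Int.floordiv exp 2)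
    let r := (hh * hh) % 1000000007
    if PySem.Int.mod exp 2 = 1 then (r * b) % 1000000007 else r
termination_by exp.toNat
decreasing_by
  rw [PySem.Int.floordiv_eq_ediv_of_pos (by omega : (0:Int) < 2)]
  omega

def countGoodNumbers_alt (n : Int) : Int :=
  let even_positions := PySem.Int.floordiv (n + 1) 2
  let odd_positions := PySem.Int.floordiv n 2
  PySem.Int.mod (pvPowerB 5 even_positions * pvPowerB 4 odd_positions) 1000000007

-- ===== PRECONDITION & SPEC =====
def Spec_countGoodNumbers (n : Int) (out : Int) : Prop := out = countGoodNumbers_alt n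
instance (n : Int) (out : Int) : Decidable (Spec_countGoodNumbers n out) := by unfold Spec_countGoodNumbers; infer_instance

-- ===== CLAIM (what is proved, stated in full; the proofs are below) =====
def Claim_equal_countGoodNumbers : Prop := ∀ (n : Int), Dom_countGoodNumbers n → Spec_countGoodNumbers n (countGoodNumbers n)

-- ===== LEMMAS AND PROOFS =====

lemma pvEmodPow (b : Int) (k : Nat) (M : Int) : (b % M) ^ k % M = b ^ k % M := by
  induction k with
  | zero => simp
  | succ k ih =>
    rw [pow_succ, pow_succ, Int.mul_emod, ih, Int.emod_emod_of_dvd _ dvd_rfl, ← Int.mul_emod]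

lemma pvMulEmodL (x y M : Int) : (x % M * y) % M = (x * y) % M := by
  rw [Int.mul_emod, Int.emod_emod_of_dvd _ dvd_rfl, ← Int.mul_emod]

lemma pvMulEmodR (x y M : Int) : (x * (y % M)) % M = (x * y) % M := by
  rw [Int.mul_emod, Int.emod_emod_of_dvd _ dvd_rfl, ← Int.mul_emod]

lemma pvMulPowEmod (x b : Int) (m : Nat) (M : Int) : (x * (b % M) ^ m) % M = (x * b ^ m) % M := by
  rw [Int.mul_emod, pvEmodPow, ← Int.mul_emod]

lemma pvPowLoopA_eq (k : Nat) : ∀ (r b e : Int), e.toNat ≤ k → 0 ≤ r → r < 1000000007 →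
    pvPowLoopA r b e = (r * b ^ e.toNat) % 1000000007 := by
  induction k with
  | zero =>
    intro r b e hk hr0 hr1
    have he : ¬ e > 0 := by omega
    rw [pvPowLoopA, dif_neg he]
    have h0 : e.toNat = 0 := by omega
    rw [h0, pow_zero, mul_one, Int.emod_eq_of_lt hr0 hr1]
  | succ k ih =>
    intro r b e hk hr0 hr1
    by_cases he : e > 0
    · rw [pvPowLoopA, dif_pos he]
      rw [PySem.Int.mod_eq_emod_of_pos (by omega : (0:Int) < 2),
          PySem.Int.floordiv_eq_ediv_of_pos (by omega : (0:Int) < 2)]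
      simp only []
      have hhalf : (e / 2).toNat = e.toNat / 2 := by omega
      by_cases hodd : e % 2 = 1
      · rw [if_pos hodd]
        rw [ih ((r * b) % 1000000007) ((b * b) % 1000000007) (e / 2)
             (by omega) (Int.emod_nonneg _ (by norm_num)) (Int.emod_lt_of_pos _ (by norm_num))]
        rw [hhalf, pvMulEmodL, pvMulPowEmod]
        congr 1
        have hexp : e.toNat = 2 * (e.toNat / 2) + 1 := by omega
        conv_rhs => rw [hexp]
        ring
      · rw [if_neg hodd]
        rw [ih r ((b * b) % 1000000007) (e / 2) (by omega) hr0 hr1]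
        rw [hhalf, pvMulPowEmod]
        congr 1
        have hexp : e.toNat = 2 * (e.toNat / 2) := by omega
        conv_rhs => rw [hexp]
        ring
    · rw [pvPowLoopA, dif_neg he]
      have h0 : e.toNat = 0 := by omega
      rw [h0, pow_zero, mul_one, Int.emod_eq_of_lt hr0 hr1]

lemma pvPowerB_eq (k : Nat) : ∀ (b e : Int), e.toNat ≤ k →
    pvPowerB b e = (b ^ e.toNat) % 1000000007 := by
  induction k with
  | zero =>
    intro b e hk
    have he : e ≤ 0 := by omega
    rw [pvPowerB, dif_pos he]
    have h0 : e.toNat = 0 := by omega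
    rw [h0, pow_zero]; norm_num
  | succ k ih =>
    intro b e hk
    by_cases he : e ≤ 0
    · rw [pvPowerB, dif_pos he]
      have h0 : e.toNat = 0 := by omega
      rw [h0, pow_zero]; norm_num
    · rw [pvPowerB, dif_neg he]
      rw [PySem.Int.mod_eq_emod_of_pos (by omega : (0:Int) < 2),
          PySem.Int.mod_eq_emod_of_pos (by norm_num : (0:Int) < 1000000007),
          PySem.Int.floordiv_eq_ediv_of_pos (by omega : (0:Int) < 2)]
      simp only []
      have hhalf : (e / 2).toNat = e.toNat / 2 := by omega
      rw [ih (b % 1000000007) (e / 2) (by omega), hhalf]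
      have hsq : (b % 1000000007) ^ (e.toNat / 2) % 1000000007 *
            ((b % 1000000007) ^ (e.toNat / 2) % 1000000007) % 1000000007
          = b ^ (2 * (e.toNat / 2)) % 1000000007 := by
        rw [← Int.mul_emod, ← pow_add, pvEmodPow]
        congr 2
        omega
      by_cases hodd : e % 2 = 1
      · rw [if_pos hodd, hsq, pvMulEmodL, pvMulEmodR, ← pow_succ]
        congr 2
        omega
      · rw [if_neg hodd, hsq]
        congr 2
        omega

lemma pvPower_eq (b e : Int) : pvPowerA b e = pvPowerB b e := by
  rw [pvPowerA, pvPowLoopA_eq e.toNat 1 _ e le_rfl (by norm_num) (by norm_num),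
      pvPowerB_eq e.toNat b e le_rfl]
  rw [PySem.Int.mod_eq_emod_of_pos (by norm_num : (0:Int) < 1000000007)]
  rw [one_mul, pvEmodPow]

-- ===== VERDICT (by name: the statement is the Claim_ definition above) =====
theorem countGoodNumbers_spec : Claim_equal_countGoodNumbers := by
  intro n _
  unfold Spec_countGoodNumbers
  simp only [countGoodNumbers, countGoodNumbers_alt, pvPower_eq]
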